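-- pv_equiv track=rewrite | github.com/volodiy17/python_urban_lessions | main_operators_module/additional_task_module_2/module_2_hard.py | get_password
-- ===== SOURCE A (Python) =====
-- def get_password(number: int):
--     result = []
--     if number < 3 or number > 20:
--         raise ValueError("Number must be greater or equal then 3 and less or equal than 20.")
--     for i in range(1, 20):
--         for j in range(1, 20):
--             if number % (i + j) == 0 and i is not j:
--                 is_copy = False
--                 for el in result:
--                     if el[0] == i and el[1] == j or el[0] == j and el[1] == i:
--                         is_copy = True
--                         break
--                 if not is_copy:
--                     result.append([i, j])
--     result = "".join("".join(str(num) for num in sub) for sub in result)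
--     return result
-- ===== SOURCE B (Python) =====
-- def get_password(number: int):
--     if number < 3 or number > 20:
--         raise ValueError("Number must be greater or equal then 3 and less or equal than 20.")
--     return "".join(f"{i}{j}" for i in range(1, 20)
--                    for j in range(i + 1, 20) if number % (i + j) == 0)
-- ===== Notes on version B (the rewrite author's own statement) =====
-- stated objective: simpler
-- what changed: The inner index runs from i+1 so each unordered pair is generated exactly once by construction, eliminating A's per-candidate duplicate scan over the accumulated result list; B is a single comprehension.
import Mathlib
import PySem

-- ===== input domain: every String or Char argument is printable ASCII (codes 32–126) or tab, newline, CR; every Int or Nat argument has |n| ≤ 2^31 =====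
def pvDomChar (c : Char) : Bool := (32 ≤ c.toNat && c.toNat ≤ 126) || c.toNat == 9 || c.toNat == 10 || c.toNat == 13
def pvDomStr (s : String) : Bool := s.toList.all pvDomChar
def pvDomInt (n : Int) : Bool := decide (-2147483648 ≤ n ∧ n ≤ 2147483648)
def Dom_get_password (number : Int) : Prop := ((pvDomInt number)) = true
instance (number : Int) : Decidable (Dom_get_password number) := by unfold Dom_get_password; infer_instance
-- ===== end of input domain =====

-- B is simpler: the inner index starts at i+1 so each unordered pair arises once by
-- construction, removing A's duplicate-scan over the accumulated result.

-- ===== PORT A =====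
def get_password (number : Int) : String :=
  -- Python raises ValueError outside 3..20; Pre_ excludes those inputs, "" here is unclaimed
  if number < 3 ∨ number > 20 then "" else
  let result : List (Int × Int) :=
    (PySem.List.pyRange 1 20 1).foldl (fun res i =>
      (PySem.List.pyRange 1 20 1).foldl (fun res j =>
        if PySem.Int.mod number (i + j) = 0 ∧ i ≠ j then
          -- the for-el-with-break duplicate scan over res
          let is_copy := res.any (fun el =>
            (el.1 = i ∧ el.2 = j) ∨ (el.1 = j ∧ el.2 = i))
          if is_copy then res else res ++ [(i, j)]
        else res) res) []
  String.join (result.map (fun sub => PySem.Int.toStr sub.1 ++ PySem.Int.toStr sub.2))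

-- ===== PORT B =====
def get_password_alt (number : Int) : String :=
  if number < 3 ∨ number > 20 then "" else
  String.join ((PySem.List.pyRange 1 20 1).flatMap (fun i =>
    (PySem.List.pyRange (i + 1) 20 1).filterMap (fun j =>
      if PySem.Int.mod number (i + j) = 0 then
        some (PySem.Int.toStr i ++ PySem.Int.toStr j)
      else none)))

-- ===== PRECONDITION & SPEC =====
-- Pre_ excludes exactly the inputs where the Python A raises ValueError (number outside 3..20).
def Pre_get_password (number : Int) : Prop := 3 ≤ number ∧ number ≤ 20
instance (number : Int) : Decidable (Pre_get_password number) := by unfold Pre_get_password; infer_instance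
def pvWitness_get_password : Int := (6)

def Spec_get_password (number : Int) (out : String) : Prop := out = get_password_alt number
instance (number : Int) (out : String) : Decidable (Spec_get_password number out) := by unfold Spec_get_password; infer_instance

-- ===== CLAIM (what is proved, stated in full; the proofs are below) =====
def Claim_equal_get_password : Prop := ∀ (number : Int), Dom_get_password number → Pre_get_password number → Spec_get_password number (get_password number)

-- ===== LEMMAS AND PROOFS =====

-- ===== VERDICT (by name: the statement is the Claim_ definition above) =====
set_option maxRecDepth 4000 in
theorem get_password_spec : Claim_equal_get_password := by
  unfold Claim_equal_get_password
  intro n _ hpre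
  obtain ⟨h1, h2⟩ := hpre
  unfold Spec_get_password
  interval_cases n <;> decide
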